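-- pv_equiv track=rewrite | github.com/brob92993/fmhy-search-streamlit | fmhy-search.py | moveBetterMatchesToFront
-- ===== SOURCE A (Python) =====
-- def removeEmptyStringsFromList(stringList):
--     return [string for string in stringList if string != '']
--
-- def checkList1isInList2(list1, list2):
--     for element in list1:
--         if element not in list2:
--             return False
--     return True
--
-- def checkWordForWordMatch(line, searchQuery):
--     lineWords = removeEmptyStringsFromList( line.lower().replace('[', ' ').replace(']', ' ').split(' ') )
--     lineWords = [element.strip() for element in lineWords] #doesnt work on streamlit without this line even though it works locally
--     searchQueryWords = removeEmptyStringsFromList( searchQuery.lower().split(' ') )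
--     return checkList1isInList2(searchQueryWords, lineWords)
--
-- def moveBetterMatchesToFront(myList, searchQuery):
--     bumped = []
--     notBumped = []
--     for element in myList:
--         if checkWordForWordMatch(element, searchQuery):
--             bumped.append(element)
--         else:
--             notBumped.append(element)
--     return (bumped + notBumped)
-- ===== SOURCE B (Python) =====
-- def moveBetterMatchesToFront(myList, searchQuery):
--     searchQueryWords = [w for w in searchQuery.lower().split(' ') if w != '']
--
--     def isMatch(line):
--         lineWords = [w.strip() for w in
--                      line.lower().replace('[', ' ').replace(']', ' ').split(' ') if w != '']
--         return all(w in lineWords for w in searchQueryWords)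
--
--     return sorted(myList, key=lambda line: not isMatch(line))
-- ===== Notes on version B (the rewrite author's own statement) =====
-- stated objective: idiomatic
-- what changed: Replaces the explicit two-accumulator bumped/notBumped partition loop with a single stable sort by the boolean key 'not match' (stability keeps matches first in original order), with the query words lowered/split once up front instead of once per line and the membership loop inlined as all(...).
import Mathlib
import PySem

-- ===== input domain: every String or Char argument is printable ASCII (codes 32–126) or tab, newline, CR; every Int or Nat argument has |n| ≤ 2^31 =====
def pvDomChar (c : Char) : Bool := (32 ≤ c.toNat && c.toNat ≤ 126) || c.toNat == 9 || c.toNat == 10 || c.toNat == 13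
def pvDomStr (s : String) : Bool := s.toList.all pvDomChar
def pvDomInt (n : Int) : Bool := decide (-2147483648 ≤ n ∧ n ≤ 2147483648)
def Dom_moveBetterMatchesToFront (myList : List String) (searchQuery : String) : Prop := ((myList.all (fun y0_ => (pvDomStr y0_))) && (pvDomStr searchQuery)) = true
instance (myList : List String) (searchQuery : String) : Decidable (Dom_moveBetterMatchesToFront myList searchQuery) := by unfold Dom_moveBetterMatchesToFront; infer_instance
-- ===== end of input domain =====

-- B replaces A's explicit bumped/notBumped partition loop with one stable sort by the
-- boolean key "not match" (more idiomatic; same return value, proved below).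

-- ===== PORT A =====
def removeEmptyStringsFromList (stringList : List String) : List String :=
  stringList.filter (fun s => s != "")

def checkList1isInList2 (list1 list2 : List String) : Bool :=
  match list1 with
  | [] => true
  | e :: rest => if list2.contains e then checkList1isInList2 rest list2 else false

def checkWordForWordMatch (line searchQuery : String) : Bool :=
  let lineWords := removeEmptyStringsFromList
    (((PySem.Str.split? (PySem.Str.replace (PySem.Str.replace (PySem.Str.lower line) "[" " ") "]" " ") " ").getD []))
  let lineWords := lineWords.map PySem.Str.strip
  let searchQueryWords := removeEmptyStringsFromList ((PySem.Str.split? (PySem.Str.lower searchQuery) " ").getD [])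
  checkList1isInList2 searchQueryWords lineWords

def moveBetterMatchesToFront (myList : List String) (searchQuery : String) : List String :=
  let st := myList.foldl
    (fun (acc : List String × List String) element =>
      if checkWordForWordMatch element searchQuery then (acc.1 ++ [element], acc.2)
      else (acc.1, acc.2 ++ [element]))
    ([], [])
  st.1 ++ st.2

-- ===== PORT B =====
def pvIsMatch (searchQueryWords : List String) (line : String) : Bool :=
  let lineWords :=
    (((PySem.Str.split? (PySem.Str.replace (PySem.Str.replace (PySem.Str.lower line) "[" " ") "]" " ") " ").getD []).filter
      (fun w => w != "")).map PySem.Str.strip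
  searchQueryWords.all (fun w => lineWords.contains w)

def moveBetterMatchesToFront_alt (myList : List String) (searchQuery : String) : List String :=
  let searchQueryWords := ((PySem.Str.split? (PySem.Str.lower searchQuery) " ").getD []).filter (fun w => w != "")
  PySem.List.sorted myList (fun line => !(pvIsMatch searchQueryWords line)) false

-- ===== PRECONDITION & SPEC =====
def Spec_moveBetterMatchesToFront (myList : List String) (searchQuery : String) (out : List String) : Prop := out = moveBetterMatchesToFront_alt myList searchQuery
instance (myList : List String) (searchQuery : String) (out : List String) : Decidable (Spec_moveBetterMatchesToFront myList searchQuery out) := by unfold Spec_moveBetterMatchesToFront; infer_instance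

-- ===== CLAIM (what is proved, stated in full; the proofs are below) =====
def Claim_equal_moveBetterMatchesToFront : Prop := ∀ (myList : List String) (searchQuery : String), Dom_moveBetterMatchesToFront myList searchQuery → Spec_moveBetterMatchesToFront myList searchQuery (moveBetterMatchesToFront myList searchQuery)

-- ===== LEMMAS AND PROOFS =====

-- A's early-return membership loop is List.all membership (B's inlined form of the predicate).
theorem checkList1isInList2_eq_all (l1 l2 : List String) :
    checkList1isInList2 l1 l2 = l1.all (fun w => l2.contains w) := by
  induction l1 with
  | nil => rfl
  | cons e rest ih =>
    simp only [checkList1isInList2, List.all_cons]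
    by_cases h : l2.contains e = true <;> simp [ih]

-- the two predicates agree pointwise
theorem match_eq (line searchQuery : String) :
    checkWordForWordMatch line searchQuery
      = pvIsMatch (((PySem.Str.split? (PySem.Str.lower searchQuery) " ").getD []).filter (fun w => w != "")) line := by
  simp only [checkWordForWordMatch, pvIsMatch, removeEmptyStringsFromList, checkList1isInList2_eq_all]

theorem insertBy_append_of_not_before {α : Type} (before : α → α → Bool) (x : α)
    (b n : List α) (hb : ∀ y ∈ b, before x y = false) :
    PySem.List.insertBy before x (b ++ n) = b ++ PySem.List.insertBy before x n := by
  induction b with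
  | nil => rfl
  | cons y ys ih =>
    have hy : before x y = false := hb y (by simp)
    simp only [List.cons_append, PySem.List.insertBy, hy]
    simp [ih (fun z hz => hb z (by simp [hz]))]

-- inserting x into a partitioned list b ++ n under the boolean key !p
theorem insertBy_partitioned (p : α → Bool) (x : α) (b n : List α)
    [DecidableEq α]
    (hb : ∀ y ∈ b, p y = true) (hn : ∀ y ∈ n, p y = false) :
    PySem.List.insertBy (fun a c => decide ((!p a) < (!p c))) x (b ++ n)
      = if p x then b ++ x :: n else (b ++ n) ++ [x] := by
  by_cases hx : p x = true
  · rw [insertBy_append_of_not_before _ x b n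
      (fun y hy => by simp [hx, hb y hy])]
    simp only [hx]
    cases n with
    | nil => rfl
    | cons z zs =>
      have hz : p z = false := hn z (by simp)
      simp [PySem.List.insertBy, hx, hz]
  · have hx' : p x = false := by simpa using hx
    rw [PySem.List.insertBy_of_forall_not_before]
    · simp [hx']
    · intro y hy
      simp only [List.mem_append] at hy
      rcases hy with hy | hy
      · simp [hx', hb y hy, Bool.lt_iff]
      · simp [hx', hn y hy]

-- the partition loop equals the stable-insertion fold, for any partitioned start state
theorem partition_foldl (p : α → Bool) [DecidableEq α] (xs : List α) :
    ∀ (b n : List α), (∀ y ∈ b, p y = true) → (∀ y ∈ n, p y = false) →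
    (let st := xs.foldl
        (fun (acc : List α × List α) e =>
          if p e then (acc.1 ++ [e], acc.2) else (acc.1, acc.2 ++ [e])) (b, n)
     st.1 ++ st.2)
      = xs.foldl (fun acc x => PySem.List.insertBy (fun a c => decide ((!p a) < (!p c))) x acc) (b ++ n) := by
  induction xs with
  | nil => intro b n _ _; rfl
  | cons x rest ih =>
    intro b n hb hn
    simp only [List.foldl_cons]
    rw [insertBy_partitioned p x b n hb hn]
    by_cases hx : p x = true
    · simp only [hx]
      have := ih (b ++ [x]) n
        (fun y hy => by rcases List.mem_append.1 hy with h | h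
                        · exact hb y h
                        · simp at h; subst h; exact hx) hn
      simpa using this
    · have hx' : p x = false := by simpa using hx
      simp only [hx', Bool.false_eq_true, if_false]
      have := ih b (n ++ [x]) hb
        (fun y hy => by rcases List.mem_append.1 hy with h | h
                        · exact hn y h
                        · simp at h; subst h; exact hx')
      simpa using this

-- ===== VERDICT (by name: the statement is the Claim_ definition above) =====
theorem moveBetterMatchesToFront_spec : Claim_equal_moveBetterMatchesToFront := by
  intro myList searchQuery _
  unfold Spec_moveBetterMatchesToFront moveBetterMatchesToFront moveBetterMatchesToFront_alt
  rw [PySem.List.sorted_eq_foldl_insertBy]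
  simp only [← match_eq]
  have := partition_foldl (fun line => checkWordForWordMatch line searchQuery) myList [] []
    (by simp) (by simp)
  simpa using this
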